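-- pv_equiv track=rewrite | github.com/stonarini/codewars | kyu-4/breadcrumb_generator.py | getShortCrumb
-- ===== SOURCE A (Python) =====
-- def getShortCrumb(newCrumb):
--     shortCrumb=""
--     currentWord=""
--     for letter in newCrumb:
--         if letter == "-":
--             if currentWord not in ["the","of","in","from","by","with","and", "or", "for", "to", "at", "a"]:
--                 shortCrumb+=currentWord[0].upper()
--             currentWord=""
--         else:
--             currentWord+=letter
--     if currentWord not in ["the","of","in","from","by","with","and", "or", "for", "to", "at", "a"]:
--         shortCrumb+=currentWord[0].upper()
--     return shortCrumb
-- ===== SOURCE B (Python) =====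
-- def getShortCrumb(newCrumb):
--     stop = ["the", "of", "in", "from", "by", "with", "and", "or", "for", "to", "at", "a"]
--     return "".join(word[0].upper() for word in newCrumb.split("-") if word not in stop)
-- ===== Notes on version B (the rewrite author's own statement) =====
-- stated objective: idiomatic
-- what changed: B tokenizes once with split('-') and joins the upper-cased initials of non-stopword tokens, replacing A's character-by-character state machine (manual currentWord accumulator, per-character string concatenation, duplicated post-loop flush) with C-level split/join.
-- outside the precondition, e.g. on getShortCrumb('-'): A raises IndexError, B raises IndexError
import Mathlib
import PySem

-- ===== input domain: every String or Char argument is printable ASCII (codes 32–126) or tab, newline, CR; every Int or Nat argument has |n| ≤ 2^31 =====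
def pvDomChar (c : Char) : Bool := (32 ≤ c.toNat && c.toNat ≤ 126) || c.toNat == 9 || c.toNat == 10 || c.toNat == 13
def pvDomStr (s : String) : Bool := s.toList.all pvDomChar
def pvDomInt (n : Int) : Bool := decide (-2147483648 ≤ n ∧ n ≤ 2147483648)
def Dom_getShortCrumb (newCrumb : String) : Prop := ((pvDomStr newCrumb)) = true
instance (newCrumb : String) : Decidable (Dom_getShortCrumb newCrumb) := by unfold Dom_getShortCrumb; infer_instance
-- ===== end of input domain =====

-- B replaces A's char-by-char state machine by split('-') + filter/map (idiomatic); equivalence is about the return value.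

-- the stopword list shared by both Pythons
def pvStop : List (List Char) :=
  ["the".toList, "of".toList, "in".toList, "from".toList, "by".toList, "with".toList,
   "and".toList, "or".toList, "for".toList, "to".toList, "at".toList, "a".toList]

-- ===== PORT A =====
-- A's loop: state (shortCrumb, currentWord); on '-' flush currentWord, else extend it; final flush after the loop.
-- currentWord[0] is ported as headD 'a' (Python raises IndexError on an empty word; such inputs are outside Pre_).
def getShortCrumb (newCrumb : String) : String :=
  let st := newCrumb.toList.foldl
    (fun (st : List Char × List Char) (letter : Char) =>
      if letter = '-' then
        (if st.2 ∈ pvStop then st.1 else st.1 ++ [(st.2.headD 'a').toUpper], [])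
      else
        (st.1, st.2 ++ [letter]))
    ([], [])
  String.mk (if st.2 ∈ pvStop then st.1 else st.1 ++ [(st.2.headD 'a').toUpper])

-- ===== PORT B =====
-- Source B: "".join(word[0].upper() for word in newCrumb.split("-") if word not in stop)
def getShortCrumb_alt (newCrumb : String) : String :=
  String.mk
    (((PySem.Chars.splitOn newCrumb.toList ['-']).filter (fun w => w ∉ pvStop)).map
      (fun w => (w.headD 'a').toUpper))

-- ===== PRECONDITION & SPEC =====
-- Pre_ excludes exactly the inputs on which both Pythons raise IndexError: a '-'-separated token is
-- empty (empty string, leading/trailing or doubled dash), where word[0] / currentWord[0] raises.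
def Pre_getShortCrumb (newCrumb : String) : Prop :=
  ∀ w ∈ PySem.Chars.splitOn newCrumb.toList ['-'], w ≠ []
instance (newCrumb : String) : Decidable (Pre_getShortCrumb newCrumb) := by
  unfold Pre_getShortCrumb; infer_instance
def pvWitness_getShortCrumb : String := "hello-world-of-code"

def Spec_getShortCrumb (newCrumb : String) (out : String) : Prop := out = getShortCrumb_alt newCrumb
instance (newCrumb : String) (out : String) : Decidable (Spec_getShortCrumb newCrumb out) := by
  unfold Spec_getShortCrumb; infer_instance

-- ===== CLAIM (what is proved, stated in full; the proofs are below) =====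
def Claim_equal_getShortCrumb : Prop := ∀ (newCrumb : String), Dom_getShortCrumb newCrumb → Pre_getShortCrumb newCrumb → Spec_getShortCrumb newCrumb (getShortCrumb newCrumb)

-- ===== LEMMAS AND PROOFS =====

-- tokens of a char list split on '-': the structural recursion both proofs are reduced to
def pvTokens : List Char → List (List Char)
  | [] => [[]]
  | c :: cs => if c = '-' then [] :: pvTokens cs else (pvTokens cs).modifyHead (c :: ·)

theorem pvTokens_ne_nil (l : List Char) : pvTokens l ≠ [] := by
  induction l with
  | nil => simp [pvTokens]
  | cons c cs ih =>
    simp only [pvTokens]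
    split
    · simp
    · cases h : pvTokens cs with
      | nil => exact absurd h ih
      | cons t ts => simp

-- splitOn.go on sep = ['-'] computes acc.reverse ++ (tokens, head prefixed by cur.reverse)
theorem pvGo_eq (l : List Char) (f : Nat) (hf : l.length ≤ f) (cur : List Char)
    (acc : List (List Char)) :
    PySem.Chars.splitOn.go ['-'] f l cur acc
      = acc.reverse ++ (pvTokens l).modifyHead (cur.reverse ++ ·) := by
  induction l generalizing f cur acc with
  | nil =>
    cases f <;> simp [PySem.Chars.splitOn.go, pvTokens]
  | cons c cs ih =>
    cases f with
    | zero => simp at hf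
    | succ f =>
      by_cases hc : c = '-'
      · subst hc
        rw [show PySem.Chars.splitOn.go ['-'] (f+1) ('-' :: cs) cur acc
              = PySem.Chars.splitOn.go ['-'] f cs [] (cur.reverse :: acc) from by
            simp [PySem.Chars.splitOn.go, List.isPrefixOf]]
        rw [ih f (by simpa using Nat.le_of_succ_le_succ (by simpa using hf)) [] (cur.reverse :: acc)]
        have hm : (pvTokens cs).modifyHead (fun x => x) = pvTokens cs := by
          cases pvTokens cs <;> simp
        simp [pvTokens, hm]
      · rw [show PySem.Chars.splitOn.go ['-'] (f+1) (c :: cs) cur acc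
              = PySem.Chars.splitOn.go ['-'] f cs (c :: cur) acc from by
            simp only [PySem.Chars.splitOn.go, List.isPrefixOf, Bool.and_eq_true, beq_iff_eq]
            rw [if_neg (by simp [hc, eq_comm])]]
        rw [ih f (by simpa using Nat.le_of_succ_le_succ (by simpa using hf)) (c :: cur) acc]
        simp only [pvTokens, if_neg hc]
        cases h : pvTokens cs with
        | nil => exact absurd h (pvTokens_ne_nil cs)
        | cons t ts => simp

theorem pvSplitOn_eq_tokens (l : List Char) :
    PySem.Chars.splitOn l ['-'] = pvTokens l := by
  unfold PySem.Chars.splitOn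
  rw [pvGo_eq l (l.length + 1) (Nat.le_succ _) [] []]
  cases pvTokens l <;> simp

-- A's slot for a finished word
def pvEmit (w : List Char) : List Char :=
  if w ∈ pvStop then [] else [(w.headD 'a').toUpper]

-- A's loop + final flush, characterised over the tokens of the remaining input
theorem pvLoop_eq (rest : List Char) (sc cw : List Char) :
    (let st := rest.foldl
        (fun (st : List Char × List Char) (letter : Char) =>
          if letter = '-' then
            (if st.2 ∈ pvStop then st.1 else st.1 ++ [(st.2.headD 'a').toUpper], [])
          else
            (st.1, st.2 ++ [letter]))
        (sc, cw)
      if st.2 ∈ pvStop then st.1 else st.1 ++ [(st.2.headD 'a').toUpper])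
      = sc ++ ((pvTokens rest).modifyHead (cw ++ ·)).flatMap pvEmit := by
  induction rest generalizing sc cw with
  | nil => simp [pvTokens, pvEmit]; split <;> simp
  | cons c cs ih =>
    by_cases hc : c = '-'
    · subst hc
      simp only [List.foldl_cons, reduceIte]
      rw [ih]
      have hm : (pvTokens cs).modifyHead (fun x => x) = pvTokens cs := by
        cases pvTokens cs <;> simp
      simp [pvTokens, pvEmit, hm]
      split <;> simp
    · simp only [List.foldl_cons, if_neg hc]
      rw [ih]
      simp only [pvTokens, if_neg hc]
      cases h : pvTokens cs with
      | nil => exact absurd h (pvTokens_ne_nil cs)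
      | cons t ts => simp

-- flatMap of an if-emit is filter-then-map
theorem pvFlatMap_emit (ts : List (List Char)) :
    ts.flatMap pvEmit = (ts.filter (fun w => w ∉ pvStop)).map (fun w => (w.headD 'a').toUpper) := by
  induction ts with
  | nil => rfl
  | cons t ts ih =>
    by_cases h : t ∈ pvStop <;> simp [pvEmit, h, ih]

-- ===== VERDICT (by name: the statement is the Claim_ definition above) =====
theorem getShortCrumb_spec : Claim_equal_getShortCrumb := by
  intro newCrumb _ _
  unfold Spec_getShortCrumb getShortCrumb getShortCrumb_alt
  rw [pvSplitOn_eq_tokens, ← pvFlatMap_emit]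
  have := pvLoop_eq newCrumb.toList [] []
  simp only [List.nil_append] at this ⊢
  rw [this]
  have hne := pvTokens_ne_nil newCrumb.toList
  cases h : pvTokens newCrumb.toList with
  | nil => exact absurd h hne
  | cons t ts => simp
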